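-- pv_equiv track=rewrite | github.com/mratet/advent-of-code_python | i18n_solutions/day_18.py | remove_lonely_max
-- ===== SOURCE A (Python) =====
-- def remove_lonely_max(nums):
--     max_val = max(nums)
--     result = nums.copy()
--
--     for i in range(len(nums)):
--         if nums[i] == max_val:
--             has_max_neighbor = (i > 0 and nums[i - 1] == max_val) or (
--                 i < len(nums) - 1 and nums[i + 1] == max_val
--             )
--             if not has_max_neighbor:
--                 result[i] -= 1
--     return result
-- ===== SOURCE B (Python) =====
-- def remove_lonely_max(nums):
--     # Run-length view: an isolated maximum is exactly a length-1 run of the max.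
--     max_val = max(nums)
--     out = []
--     i = 0
--     n = len(nums)
--     while i < n:
--         j = i + 1
--         while j < n and nums[j] == nums[i]:
--             j += 1
--         if nums[i] == max_val and j == i + 1:
--             out.append(max_val - 1)
--         else:
--             out.extend(nums[i:j])
--         i = j
--     return out
-- ===== Notes on version B (the rewrite author's own statement) =====
-- stated objective: alternative
-- what changed: Replaces per-index neighbor checks (i-1/i+1 lookups into a copied list) with a single left-to-right run-length scan: an isolated maximum is exactly a length-1 run of the max, so each maximal run of equal values is emitted unchanged unless it is a singleton run of the max.
import Mathlib
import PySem

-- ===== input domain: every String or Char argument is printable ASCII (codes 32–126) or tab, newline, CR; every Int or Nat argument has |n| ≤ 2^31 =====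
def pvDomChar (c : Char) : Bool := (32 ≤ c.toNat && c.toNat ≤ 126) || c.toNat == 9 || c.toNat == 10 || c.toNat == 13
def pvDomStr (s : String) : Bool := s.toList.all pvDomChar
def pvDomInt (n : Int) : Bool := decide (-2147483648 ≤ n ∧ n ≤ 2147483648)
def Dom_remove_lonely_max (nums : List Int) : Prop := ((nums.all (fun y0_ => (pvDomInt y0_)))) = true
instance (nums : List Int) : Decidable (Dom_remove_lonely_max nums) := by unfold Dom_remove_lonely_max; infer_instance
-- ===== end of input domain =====

-- B replaces A's per-index neighbor checks with a single run-length scan (an isolated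
-- maximum is exactly a length-1 run of the max); alternative decomposition, same cost.


-- ===== PORT A =====
-- Literal transliteration of A: max_val = max(nums); result = nums.copy();
-- for i in range(len(nums)): neighbor check, result[i] -= 1.
-- (pyGetD with default 0 is a totality guard only: every index read is in range.)
def remove_lonely_max (nums : List Int) : List Int :=
  match PySem.List.max? nums (fun y => y) with
  | none => []   -- max([]) raises ValueError; excluded by Pre_
  | some max_val =>
    (PySem.List.pyRange 0 (nums.length : Int) 1).foldl
      (fun result i =>
        if PySem.List.pyGetD nums i 0 = max_val then
          if ¬ ((decide (0 < i) && decide (PySem.List.pyGetD nums (i - 1) 0 = max_val)) ||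
                (decide (i < (nums.length : Int) - 1) &&
                 decide (PySem.List.pyGetD nums (i + 1) 0 = max_val))) then
            result.set i.toNat (PySem.List.pyGetD result i 0 - 1)
          else result
        else result)
      nums

-- ===== PORT B =====
-- B walks the list once, peeling maximal runs of equal values from the front
-- (inner while loop = takeWhile/dropWhile); a run is copied unchanged unless it
-- is a singleton run of the max, which becomes [max_val - 1].
def rlmGo (max_val : Int) : List Int → List Int
  | [] => []
  | x :: xs =>
    let run := x :: xs.takeWhile (fun y => y == x)
    let rest := xs.dropWhile (fun y => y == x)
    (if x = max_val ∧ run.length = 1 then [max_val - 1] else run) ++ rlmGo max_val rest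
  termination_by l => l.length
  decreasing_by
    simpa using Nat.lt_succ_of_le (List.length_dropWhile_le _ _)

def remove_lonely_max_alt (nums : List Int) : List Int :=
  match PySem.List.max? nums (fun y => y) with
  | none => []   -- max([]) raises ValueError; excluded by Pre_
  | some max_val => rlmGo max_val nums

-- ===== PRECONDITION & SPEC =====
-- Pre_ excludes only the empty list, on which both A and B raise ValueError (max([])).
def Pre_remove_lonely_max (nums : List Int) : Prop := nums ≠ []
instance (nums : List Int) : Decidable (Pre_remove_lonely_max nums) := by
  unfold Pre_remove_lonely_max; infer_instance
def pvWitness_remove_lonely_max : List Int := [3, 1, 3, 3, 2]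

def Spec_remove_lonely_max (nums : List Int) (out : List Int) : Prop := out = remove_lonely_max_alt nums
instance (nums : List Int) (out : List Int) : Decidable (Spec_remove_lonely_max nums out) := by unfold Spec_remove_lonely_max; infer_instance

-- ===== CLAIM (what is proved, stated in full; the proofs are below) =====
def Claim_equal_remove_lonely_max : Prop := ∀ (nums : List Int), Dom_remove_lonely_max nums → Pre_remove_lonely_max nums → Spec_remove_lonely_max nums (remove_lonely_max nums)

-- ===== LEMMAS AND PROOFS =====

-- One output element, from the max M, the previous element (none at the left edge),
-- the element itself and the next element (none at the right edge).
def rlmNb (M : Int) (p : Option Int) (c : Int) (q : Option Int) : Int :=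
  if c = M ∧ p ≠ some M ∧ q ≠ some M then c - 1 else c

-- Pointwise reference: walk the list carrying the previous element.
def rlmPw (M : Int) (p : Option Int) : List Int → List Int
  | [] => []
  | c :: rest => rlmNb M p c rest.head? :: rlmPw M (some c) rest

theorem rlmPw_length (M : Int) (l : List Int) : ∀ p, (rlmPw M p l).length = l.length := by
  induction l with
  | nil => intro p; rfl
  | cons c rest ih => intro p; simp [rlmPw, ih]

-- A run of equal values is emitted unchanged by rlmPw (each run element sees an
-- equal neighbor inside the run, or is not the max at all).
theorem rlmPw_run (M x : Int) (d : List Int) :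
    ∀ (t : List Int) (p : Option Int), (∀ y ∈ t, y = x) →
      (t ≠ [] ∨ x ≠ M ∨ p = some x) →
      rlmPw M p (x :: (t ++ d)) = (x :: t) ++ rlmPw M (some x) d := by
  intro t
  induction t with
  | nil =>
    intro p ht h
    rcases h with h | h | h
    · exact absurd rfl h
    · simp [rlmPw, rlmNb, h]
    · subst h
      have hnb : rlmNb M (some x) x d.head? = x := by
        unfold rlmNb; split_ifs with hc
        · exact absurd (congrArg some hc.1) hc.2.1
        · rfl
      simp [rlmPw, hnb]
  | cons y t' ih =>
    intro p ht h
    have hy : y = x := ht y (by simp)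
    subst hy
    have ht' : ∀ z ∈ t', z = y := fun z hz => ht z (by simp [hz])
    have step := ih (some y) ht' (by
      by_cases hc : t' = []
      · by_cases hxM : y = M
        · right; right; rfl
        · right; left; exact hxM
      · left; exact hc)
    have hnb : rlmNb M p y (some y) = y := by
      unfold rlmNb; split_ifs with hc
      · exact absurd (congrArg some hc.1) hc.2.2
      · rfl
    simp only [List.cons_append, rlmPw, List.head?_cons] at step ⊢
    rw [hnb, step]

-- B's run-peeling loop computes the pointwise reference, provided the carried
-- previous value differs from the head (true initially and after each run).
theorem rlmGo_eq_rlmPw (M : Int) :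
    ∀ (n : Nat) (l : List Int), l.length ≤ n → ∀ p,
      (∀ x, l.head? = some x → p ≠ some x) →
      rlmGo M l = rlmPw M p l := by
  intro n
  induction n with
  | zero =>
    intro l hl p _
    have : l = [] := List.length_eq_zero_iff.mp (Nat.le_zero.mp hl)
    subst this; simp [rlmGo, rlmPw]
  | succ n ih =>
    intro l hl p hp
    cases l with
    | nil => simp [rlmGo, rlmPw]
    | cons x xs =>
      set t := xs.takeWhile (fun y => y == x) with ht
      set d := xs.dropWhile (fun y => y == x) with hd
      have hxs : t ++ d = xs := List.takeWhile_append_dropWhile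
      have htx : ∀ y ∈ t, y = x := by
        intro y hy
        have := List.mem_takeWhile_imp hy
        simpa using this
      have hdhead : ∀ z, d.head? = some z → z ≠ x := by
        intro z hz
        have := List.head?_dropWhile_not (fun y => y == x) xs
        rw [← hd, hz] at this
        simpa using this
      have hdlen : d.length ≤ n := by
        have h1 : d.length ≤ xs.length := List.length_dropWhile_le _ _
        have h2 : xs.length + 1 ≤ n + 1 := by simpa using hl
        omega
      have hrec : rlmGo M d = rlmPw M (some x) d := by
        apply ih d hdlen (some x)
        intro z hz hcon
        exact hdhead z hz (by injection hcon; omega)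
      have hgo : rlmGo M (x :: xs) =
          (if x = M ∧ (x :: t).length = 1 then [M - 1] else x :: t) ++ rlmGo M d := by
        rw [rlmGo]
      rw [hgo, hrec]
      by_cases hone : t = []
      · -- singleton run
        rw [hone] at hxs
        simp only [List.nil_append] at hxs
        rw [hone]
        have hnbd : rlmNb M p x d.head? = if x = M then M - 1 else x := by
          by_cases hxM : x = M
          · have h1 : p ≠ some M := by rw [← hxM]; exact hp x rfl
            have h2 : d.head? ≠ some M := by
              cases hh : d.head? with
              | none => simp
              | some z =>
                have hz := hdhead z hh
                simp only [ne_eq, Option.some.injEq]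
                intro hzM; exact hz (by rw [hzM, ← hxM])
            rw [if_pos hxM]; unfold rlmNb
            rw [if_pos ⟨hxM, h1, h2⟩, hxM]
          · rw [if_neg hxM]; simp [rlmNb, hxM]
        rw [← hxs]
        simp only [rlmPw]
        rw [hnbd]
        by_cases hxM : x = M
        · simp [hxM]
        · simp [hxM]
      · -- run of length ≥ 2: emitted unchanged
        have hlen : ¬ (x = M ∧ (x :: t).length = 1) := by
          rintro ⟨_, hl1⟩
          exact hone (by simpa using hl1)
        rw [if_neg hlen, ← hxs]
        exact (rlmPw_run M x d t p htx (Or.inl hone)).symm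

-- getElem characterization of rlmPw.
theorem rlmPw_getElem (M : Int) (l : List Int) :
    ∀ (p : Option Int) (j : Nat) (h : j < (rlmPw M p l).length),
      (rlmPw M p l)[j] =
        rlmNb M (if j = 0 then p else some (l.getD (j - 1) 0))
          (l.getD j 0) l[j + 1]? := by
  induction l with
  | nil => intro p j h; simp [rlmPw] at h
  | cons c rest ih =>
    intro p j h
    cases j with
    | zero =>
      simp [rlmPw, List.head?_eq_getElem?]
    | succ k =>
      have hk : k < (rlmPw M (some c) rest).length := by
        simp [rlmPw] at h; simpa [rlmPw_length] using h
      show (rlmPw M (some c) rest)[k] = _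
      rw [ih (some c) k hk]
      cases k with
      | zero => simp
      | succ m => simp

-- The per-index decremented value A computes at index j.
def rlmFinal (M : Int) (nums : List Int) (j : Nat) : Int :=
  rlmNb M (if j = 0 then none else some (nums.getD (j - 1) 0)) (nums.getD j 0) nums[j + 1]?

-- State of A's result list after the first k iterations.
def rlmMix (M : Int) (nums : List Int) (k : Nat) : List Int :=
  List.ofFn (n := nums.length) fun j => if (j : Nat) < k then rlmFinal M nums j else nums.getD j 0

theorem rlmMix_zero (M : Int) (nums : List Int) : rlmMix M nums 0 = nums := by
  apply List.ext_getElem (by simp [rlmMix])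
  intro j h1 h2
  simp [rlmMix]

-- The fold body of A's port.
def rlmBody (M : Int) (nums : List Int) (result : List Int) (i : Int) : List Int :=
  if PySem.List.pyGetD nums i 0 = M then
    if ¬ ((decide (0 < i) && decide (PySem.List.pyGetD nums (i - 1) 0 = M)) ||
          (decide (i < (nums.length : Int) - 1) &&
           decide (PySem.List.pyGetD nums (i + 1) 0 = M))) then
      result.set i.toNat (PySem.List.pyGetD result i 0 - 1)
    else result
  else result

theorem rlmBody_step (M : Int) (nums : List Int) (k : Nat) (hk : k < nums.length) :
    rlmBody M nums (rlmMix M nums k) (k : Int) = rlmMix M nums (k + 1) := by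
  have hget : PySem.List.pyGetD nums (k : Int) 0 = nums.getD k 0 :=
    PySem.List.pyGetD_natCast nums k 0
  have hmixk : PySem.List.pyGetD (rlmMix M nums k) (k : Int) 0 = nums.getD k 0 := by
    rw [PySem.List.pyGetD_natCast]
    simp [rlmMix, List.getD_eq_getElem?_getD, hk]
  have hcond : (¬ ((decide (0 < (k : Int)) && decide (PySem.List.pyGetD nums ((k : Int) - 1) 0 = M)) ||
          (decide ((k : Int) < (nums.length : Int) - 1) &&
           decide (PySem.List.pyGetD nums ((k : Int) + 1) 0 = M))))
      ↔ ((if k = 0 then (none : Option Int) else some (nums.getD (k - 1) 0)) ≠ some M ∧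
          nums[k + 1]? ≠ some M) := by
    simp only [Bool.or_eq_true, Bool.and_eq_true, decide_eq_true_eq, not_or, not_and]
    constructor
    · rintro ⟨h1, h2⟩
      refine ⟨?_, ?_⟩
      · by_cases h0 : k = 0
        · simp [h0]
        · have hm := h1 (by omega)
          rw [show ((k : Int) - 1) = ((k - 1 : Nat) : Int) by omega,
              PySem.List.pyGetD_natCast] at hm
          simp only [h0, ne_eq]
          simpa using hm
      · by_cases hlast : k + 1 < nums.length
        · have hm := h2 (by omega)
          rw [show ((k : Int) + 1) = ((k + 1 : Nat) : Int) by omega,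
              PySem.List.pyGetD_natCast] at hm
          rw [List.getElem?_eq_getElem hlast]
          simp only [ne_eq, Option.some.injEq]
          intro hc
          exact hm (by rw [List.getD_eq_getElem _ _ hlast]; exact hc)
        · rw [List.getElem?_eq_none (by omega)]
          simp
    · rintro ⟨h1, h2⟩
      refine ⟨?_, ?_⟩
      · intro hkpos
        have h0 : ¬ k = 0 := by omega
        rw [show ((k : Int) - 1) = ((k - 1 : Nat) : Int) by omega,
            PySem.List.pyGetD_natCast]
        simp only [h0, ne_eq] at h1
        simpa using h1
      · intro hlt
        have hlast : k + 1 < nums.length := by omega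
        rw [show ((k : Int) + 1) = ((k + 1 : Nat) : Int) by omega,
            PySem.List.pyGetD_natCast]
        rw [List.getElem?_eq_getElem hlast] at h2
        simp only [ne_eq, Option.some.injEq] at h2
        intro hc
        exact h2 (by rw [← List.getD_eq_getElem _ _ hlast]; exact hc)
  unfold rlmBody
  rw [hget, hmixk]
  by_cases hM : nums.getD k 0 = M
  · rw [if_pos hM]
    by_cases hc : ((if k = 0 then (none : Option Int) else some (nums.getD (k - 1) 0)) ≠ some M ∧
          nums[k + 1]? ≠ some M)
    · rw [if_pos (hcond.mpr hc)]
      apply List.ext_getElem (by simp [rlmMix])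
      intro j h1 h2
      rw [List.getElem_set]
      simp only [Int.toNat_natCast]
      have hjlen : j < nums.length := by simpa [rlmMix] using h2
      by_cases hjk : k = j
      · subst hjk
        rw [if_pos rfl]
        simp only [rlmMix, List.getElem_ofFn]
        rw [if_pos (by omega)]
        unfold rlmFinal rlmNb
        rw [if_pos ⟨hM, hc.1, hc.2⟩]
      · rw [if_neg hjk]
        simp only [rlmMix, List.getElem_ofFn]
        by_cases hjlt : j < k
        · rw [if_pos hjlt, if_pos (by omega)]
        · rw [if_neg hjlt, if_neg (by omega)]
    · rw [if_neg (fun h => hc (hcond.mp h))]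
      apply List.ext_getElem (by simp [rlmMix])
      intro j h1 h2
      simp only [rlmMix, List.getElem_ofFn]
      by_cases hjk : j = k
      · subst hjk
        rw [if_neg (by omega), if_pos (by omega)]
        unfold rlmFinal rlmNb
        rw [if_neg]
        rintro ⟨_, hb, hcq⟩
        exact hc ⟨hb, hcq⟩
      · by_cases hjlt : j < k
        · rw [if_pos hjlt, if_pos (by omega)]
        · rw [if_neg hjlt, if_neg (by omega)]
  · rw [if_neg hM]
    apply List.ext_getElem (by simp [rlmMix])
    intro j h1 h2
    simp only [rlmMix, List.getElem_ofFn]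
    by_cases hjk : j = k
    · subst hjk
      rw [if_neg (by omega), if_pos (by omega)]
      unfold rlmFinal rlmNb
      rw [if_neg (by rintro ⟨ha, _⟩; exact hM ha)]
    · by_cases hjlt : j < k
      · rw [if_pos hjlt, if_pos (by omega)]
      · rw [if_neg hjlt, if_neg (by omega)]

theorem rlmFold (M : Int) (nums : List Int) :
    ∀ (k : Nat), k ≤ nums.length →
      (PySem.List.pyRange 0 (k : Int) 1).foldl (rlmBody M nums) nums = rlmMix M nums k := by
  intro k
  induction k with
  | zero =>
    intro _
    rw [PySem.List.pyRange_one_eq_nil (by omega)]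
    simpa using (rlmMix_zero M nums).symm
  | succ n ih =>
    intro h
    rw [show ((n + 1 : Nat) : Int) = (n : Int) + 1 by push_cast; ring,
        PySem.List.pyRange_one_succ_right (by omega), List.foldl_append, ih (by omega)]
    simpa using rlmBody_step M nums n (by omega)

theorem rlmMix_eq_rlmPw (M : Int) (nums : List Int) :
    rlmMix M nums nums.length = rlmPw M none nums := by
  apply List.ext_getElem (by simp [rlmMix, rlmPw_length])
  intro j h1 h2
  have hj : j < nums.length := by simpa [rlmMix] using h1
  rw [rlmPw_getElem M nums none j h2]
  simp only [rlmMix, List.getElem_ofFn, if_pos hj]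
  rfl

-- ===== VERDICT (by name: the statement is the Claim_ definition above) =====
theorem remove_lonely_max_spec : Claim_equal_remove_lonely_max := by
  intro nums _ hpre
  unfold Spec_remove_lonely_max
  unfold remove_lonely_max remove_lonely_max_alt
  cases hmax : PySem.List.max? nums (fun y => y) with
  | none =>
    exact absurd ((PySem.List.max?_eq_none_iff nums _).mp hmax) hpre
  | some M =>
    show ((PySem.List.pyRange 0 (nums.length : Int) 1).foldl (rlmBody M nums) nums) = rlmGo M nums
    rw [rlmFold M nums nums.length le_rfl, rlmMix_eq_rlmPw]
    exact (rlmGo_eq_rlmPw M nums.length nums le_rfl none (fun x _ h => by cases h)).symm
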